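-- pv_equiv track=rewrite | github.com/matt-lewton9/CoronaBot | coronaHelper.py | dad
-- ===== SOURCE A (Python) =====
-- def dad(msg):
--     #scan message
--     punctuations = '''!()[]{};:'",<>./?@#$%^&*~'''
--     output = None
--     no_punct = ""
--     for char in msg:
--         if char not in punctuations:
--             no_punct = no_punct + char
--
--     msg = no_punct.lower()
--
--     words = msg.lower().split()
--     im = ["i'm", 'im']
--     for i in words:
--         if i in im:
--             im_int = words.index(i)
--             if words[im_int+1] in ['a', 'an', 'the']:
--                 output = "Hi " + words[im_int+2] + ", I'm dad."
--             elif words[im_int+1] == "not":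
--                 output = "Hi not " + words[im_int+2] + ", I'm dad."
--             else:
--                 output = "Hi " + words[im_int+1] + ", I'm dad."
--     return output
-- ===== SOURCE B (Python) =====
-- def dad(msg):
--     punctuations = '''!()[]{};:'",<>./?@#$%^&*~'''
--     it = iter("".join(c for c in msg if c not in punctuations).lower().split())
--     for w in it:
--         if w == 'im':
--             nxt = next(it)
--             if nxt in ('a', 'an', 'the'):
--                 return "Hi " + next(it) + ", I'm dad."
--             if nxt == 'not':
--                 return "Hi not " + next(it) + ", I'm dad."
--             return "Hi " + nxt + ", I'm dad."
--     return None
-- ===== Notes on version B (the rewrite author's own statement) =====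
-- stated objective: alternative
-- what changed: A rebuilds the stripped string by repeated concatenation and, looping over every word, rescans the word list with list.index on each match; B streams once: a join-filter strips punctuation and a single iterator pass returns at the first 'im', pulling the following word(s) with next() instead of any index lookup (valid because the apostrophe of "i'm" is always stripped, so A's answer is always determined by the first occurrence of 'im').
import Mathlib
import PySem

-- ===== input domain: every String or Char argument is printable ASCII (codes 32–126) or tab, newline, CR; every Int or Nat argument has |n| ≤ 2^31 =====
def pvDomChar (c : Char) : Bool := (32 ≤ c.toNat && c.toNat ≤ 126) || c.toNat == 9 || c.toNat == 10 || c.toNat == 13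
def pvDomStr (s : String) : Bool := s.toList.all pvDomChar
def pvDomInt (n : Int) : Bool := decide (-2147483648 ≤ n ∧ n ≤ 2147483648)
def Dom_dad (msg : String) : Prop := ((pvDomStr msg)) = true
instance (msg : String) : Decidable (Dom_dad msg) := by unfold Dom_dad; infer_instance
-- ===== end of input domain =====

-- B streams the cleaned words once with an iterator and returns at the first 'im' (a cons
-- recursion in the port), instead of A's rebuild-by-concatenation and per-word list.index
-- rescan; objective: a simpler, plainer program.

def dadPunct : List Char := "!()[]{};:'\",<>./?@#$%^&*~".toList

-- ===== PORT A =====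
def dad (msg : String) : Option String :=
  let no_punct : List Char :=
    msg.toList.foldl (fun acc c => if c ∈ dadPunct then acc else acc ++ [c]) []
  let m : List Char := PySem.Chars.lower no_punct
  let words : List (List Char) := PySem.Chars.split₀ (PySem.Chars.lower m)
  let output : Option (List Char) := words.foldl (fun output i =>
    if i = "i'm".toList ∨ i = "im".toList then
      match PySem.List.index? words i with
      | none => output            -- unreachable: i ∈ words
      | some k =>
        match PySem.List.pyGet? words ((k : Int) + 1) with
        | none => output          -- Python raises IndexError here; excluded by Pre_dad
        | some w1 =>
          if w1 = "a".toList ∨ w1 = "an".toList ∨ w1 = "the".toList then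
            match PySem.List.pyGet? words ((k : Int) + 2) with
            | none => output      -- IndexError; excluded by Pre_dad
            | some w2 => some ("Hi ".toList ++ w2 ++ ", I'm dad.".toList)
          else if w1 = "not".toList then
            match PySem.List.pyGet? words ((k : Int) + 2) with
            | none => output      -- IndexError; excluded by Pre_dad
            | some w2 => some ("Hi not ".toList ++ w2 ++ ", I'm dad.".toList)
          else some ("Hi ".toList ++ w1 ++ ", I'm dad.".toList)
    else output) none
  output.map String.ofList

-- ===== PORT B =====
-- Source B's 'for w in it' with 'next(it)' calls inside is exactly this cons recursion on the
-- word list; a 'next' on an exhausted iterator raises StopIteration → none (outside Pre_dad).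
def dadWalk : List (List Char) → Option (List Char)
  | [] => none
  | w :: ws =>
    if w = "im".toList then
      match ws with
      | [] => none                 -- StopIteration; excluded by Pre_dad
      | nxt :: rest =>
        if nxt = "a".toList ∨ nxt = "an".toList ∨ nxt = "the".toList then
          match rest with
          | [] => none             -- StopIteration; excluded by Pre_dad
          | w2 :: _ => some ("Hi ".toList ++ w2 ++ ", I'm dad.".toList)
        else if nxt = "not".toList then
          match rest with
          | [] => none             -- StopIteration; excluded by Pre_dad
          | w2 :: _ => some ("Hi not ".toList ++ w2 ++ ", I'm dad.".toList)
        else some ("Hi ".toList ++ nxt ++ ", I'm dad.".toList)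
    else dadWalk ws

def dad_alt (msg : String) : Option String :=
  (dadWalk (PySem.Chars.split₀
    (PySem.Chars.lower (msg.toList.filter (fun c => ¬ c ∈ dadPunct))))).map String.ofList

-- ===== PRECONDITION & SPEC =====
-- the words of the cleaned message, used only to state Pre_dad
def pvWords (msg : String) : List (List Char) :=
  PySem.Chars.split₀ (PySem.Chars.lower (msg.toList.filter (fun c => ¬ c ∈ dadPunct)))

def pvPreCheck (W : List (List Char)) : Bool :=
  match PySem.List.index? W "im".toList with
  | none => true
  | some k =>
    decide (k + 1 < W.length) &&
      (if W.getD (k+1) [] = "a".toList ∨ W.getD (k+1) [] = "an".toList ∨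
          W.getD (k+1) [] = "the".toList ∨ W.getD (k+1) [] = "not".toList
       then decide (k + 2 < W.length) else true)

-- Pre_dad excludes exactly the inputs where both Pythons raise (IndexError / StopIteration):
-- the first occurrence of the word 'im' (after stripping punctuation and lowercasing) is the
-- last word, or is followed by 'a'/'an'/'the'/'not' standing as the last word.
def Pre_dad (msg : String) : Prop :=
  pvPreCheck (pvWords msg) = true

instance (msg : String) : Decidable (Pre_dad msg) := by unfold Pre_dad; infer_instance

def pvWitness_dad : String := "im dad"

def Spec_dad (msg : String) (out : Option String) : Prop := out = dad_alt msg
instance (msg : String) (out : Option String) : Decidable (Spec_dad msg out) := by unfold Spec_dad; infer_instance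

-- ===== CLAIM (what is proved, stated in full; the proofs are below) =====
def Claim_equal_dad : Prop := ∀ (msg : String), Dom_dad msg → Pre_dad msg → Spec_dad msg (dad msg)

-- ===== LEMMAS AND PROOFS =====

-- proof-only characterisation of the result in terms of the first index of 'im'
def pvIdxAt (W : List (List Char)) (i : Nat) : Option (List Char) :=
  match PySem.List.pyGet? W ((i : Int) + 1) with
  | none => none
  | some nxt =>
    if nxt = "a".toList ∨ nxt = "an".toList ∨ nxt = "the".toList then
      match PySem.List.pyGet? W ((i : Int) + 2) with
      | none => none
      | some w2 => some ("Hi ".toList ++ w2 ++ ", I'm dad.".toList)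
    else if nxt = "not".toList then
      match PySem.List.pyGet? W ((i : Int) + 2) with
      | none => none
      | some w2 => some ("Hi not ".toList ++ w2 ++ ", I'm dad.".toList)
    else some ("Hi ".toList ++ nxt ++ ", I'm dad.".toList)

def pvIdxExpr (W : List (List Char)) : Option (List Char) :=
  match PySem.List.index? W "im".toList with
  | none => none
  | some i => pvIdxAt W i

lemma pvCharLe (c d : Char) : c ≤ d ↔ c.toNat ≤ d.toNat := by
  rw [Char.le_def, UInt32.le_iff_toNat_le]; rfl

lemma pvUpperBounds (c : Char) (h : PySem.Chars.isupper c = true) : 65 ≤ c.toNat ∧ c.toNat ≤ 90 := by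
  simp only [PySem.Chars.isupper, Bool.and_eq_true, decide_eq_true_eq] at h
  rw [pvCharLe] at h; rw [pvCharLe] at h
  exact ⟨h.1, h.2⟩

lemma pvLowerCharToNat (c : Char) (h : PySem.Chars.isupper c = true) :
    (PySem.Chars.lowerChar c).toNat = c.toNat + 32 := by
  have hb := pvUpperBounds c h
  simp only [PySem.Chars.lowerChar, h, if_true]
  rw [Char.toNat_ofNat]
  have : (c.toNat + 32).isValidChar := by
    simp only [Nat.isValidChar]; omega
  simp [this]

lemma pvLowerCharFix (c : Char) (h : PySem.Chars.isupper c = false) :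
    PySem.Chars.lowerChar c = c := by
  simp [PySem.Chars.lowerChar, h]

lemma pvNotUpperLowerChar (c : Char) : PySem.Chars.isupper (PySem.Chars.lowerChar c) = false := by
  by_cases h : PySem.Chars.isupper c
  · have := pvLowerCharToNat c h
    have hb := pvUpperBounds c h
    simp only [PySem.Chars.isupper, Bool.and_eq_false_iff, decide_eq_false_iff_not]
    right
    rw [pvCharLe]
    have hz : ('Z').toNat = 90 := rfl
    omega
  · simp only [Bool.not_eq_true] at h
    rw [pvLowerCharFix c h]; exact h

lemma pvLowerCharIdem (c : Char) :
    PySem.Chars.lowerChar (PySem.Chars.lowerChar c) = PySem.Chars.lowerChar c :=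
  pvLowerCharFix _ (pvNotUpperLowerChar c)

lemma pvLowerCharNeApos (c : Char) (hc : c ≠ '\'') : PySem.Chars.lowerChar c ≠ '\'' := by
  by_cases h : PySem.Chars.isupper c
  · intro he
    have := pvLowerCharToNat c h
    rw [he] at this
    have hb := pvUpperBounds c h
    simp at this; omega
  · simp only [Bool.not_eq_true] at h
    rw [pvLowerCharFix c h]; exact hc

lemma pvLowerIdem (l : List Char) :
    PySem.Chars.lower (PySem.Chars.lower l) = PySem.Chars.lower l := by
  simp only [PySem.Chars.lower, List.map_map]
  exact List.map_congr_left (fun c _ => pvLowerCharIdem c)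

-- every character of every word of split() comes from the input characters
lemma pvSplitGoChars (P : Char → Prop) : ∀ (s cur : List Char) (acc : List (List Char)),
    (∀ w ∈ acc, ∀ c ∈ w, P c) → (∀ c ∈ cur, P c) → (∀ c ∈ s, P c) →
    ∀ w ∈ PySem.Chars.split₀.go s cur acc, ∀ c ∈ w, P c := by
  intro s
  induction s with
  | nil =>
    intro cur acc hacc hcur _ w hw
    rw [PySem.Chars.split₀.go] at hw
    split at hw
    · exact fun c hc => hacc w (List.mem_reverse.mp hw) c hc
    · rcases List.mem_cons.mp (List.mem_reverse.mp hw) with h | h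
      · subst h; exact fun c hc => hcur c (List.mem_reverse.mp hc)
      · exact fun c hc => hacc w h c hc
  | cons a t ih =>
    intro cur acc hacc hcur hs w hw
    rw [PySem.Chars.split₀.go] at hw
    split at hw
    · split at hw
      · exact ih [] acc hacc (by simp) (fun c hc => hs c (List.mem_cons_of_mem a hc)) w hw
      · refine ih [] (cur.reverse :: acc) ?_ (by simp) (fun c hc => hs c (List.mem_cons_of_mem a hc)) w hw
        intro v hv c hc
        rcases List.mem_cons.mp hv with h | h
        · subst h; exact hcur c (List.mem_reverse.mp hc)
        · exact hacc v h c hc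
    · refine ih (a :: cur) acc hacc ?_ (fun c hc => hs c (List.mem_cons_of_mem a hc)) w hw
      intro c hc
      rcases List.mem_cons.mp hc with h | h
      · subst h; exact hs _ List.mem_cons_self
      · exact hcur c h

lemma pvSplitChars (P : Char → Prop) (s : List Char) (h : ∀ c ∈ s, P c) :
    ∀ w ∈ PySem.Chars.split₀ s, ∀ c ∈ w, P c :=
  pvSplitGoChars P s [] [] (by simp) (by simp) h

-- no word of the cleaned message is "i'm": the apostrophe was stripped
lemma pvNoIm' (msg : String) : ∀ w ∈ pvWords msg, w ≠ "i'm".toList := by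
  intro w hw he
  have hchars : ∀ c ∈ PySem.Chars.lower (msg.toList.filter (fun c => ¬ c ∈ dadPunct)), c ≠ '\'' := by
    intro c hc
    rcases List.mem_map.mp hc with ⟨d, hd, rfl⟩
    have hdp : ¬ d ∈ dadPunct := by
      have := List.of_mem_filter hd
      simpa using this
    apply pvLowerCharNeApos
    intro hde; subst hde
    exact hdp (by decide)
  have := pvSplitChars _ _ hchars w hw '\'' (by rw [he]; decide)
  exact this rfl

lemma pvFoldP {f : Option (List Char) → List Char → Option (List Char)}
    (W : List (List Char)) (v : Option (List Char))
    (hf : ∀ (o : Option (List Char)) (x : List Char), x ∈ W →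
      f o x = if x = "im".toList then v else o) :
    ∀ init, W.foldl f init = if "im".toList ∈ W then v else init := by
  induction W with
  | nil => intro init; simp
  | cons a t ih =>
    intro init
    have ih' := ih (fun o x hx => hf o x (List.mem_cons_of_mem a hx))
    rw [List.foldl_cons, hf init a List.mem_cons_self, ih']
    by_cases ha : a = "im".toList <;> by_cases ht : "im".toList ∈ t <;>
      simp_all [List.mem_cons, eq_comm]

-- A's fold equals the index characterisation, given the precondition
lemma pvCore (W : List (List Char)) (hW : ∀ w ∈ W, w ≠ "i'm".toList)
    (hpre : pvPreCheck W = true) :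
    W.foldl (fun output i =>
      if i = "i'm".toList ∨ i = "im".toList then
        match PySem.List.index? W i with
        | none => output
        | some k =>
          match PySem.List.pyGet? W ((k : Int) + 1) with
          | none => output
          | some w1 =>
            if w1 = "a".toList ∨ w1 = "an".toList ∨ w1 = "the".toList then
              match PySem.List.pyGet? W ((k : Int) + 2) with
              | none => output
              | some w2 => some ("Hi ".toList ++ w2 ++ ", I'm dad.".toList)
            else if w1 = "not".toList then
              match PySem.List.pyGet? W ((k : Int) + 2) with
              | none => output
              | some w2 => some ("Hi not ".toList ++ w2 ++ ", I'm dad.".toList)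
            else some ("Hi ".toList ++ w1 ++ ", I'm dad.".toList)
      else output) none
    = pvIdxExpr W := by
  cases h : PySem.List.index? W "im".toList with
  | none =>
    have hnm : "im".toList ∉ W := (PySem.List.index?_eq_none_iff _ _).mp h
    refine Eq.trans (pvFoldP W none ?_ none) ?_
    · intro o x hx
      have h1 := hW x hx
      have h2 : x ≠ "im".toList := fun he => hnm (he ▸ hx)
      simp at h1 h2
      simp [h1, h2]
    · rw [if_neg hnm]
      unfold pvIdxExpr
      rw [h]
  | some k =>
    have hmem : "im".toList ∈ W :=
      (PySem.List.index?_isSome_iff W _).mp (by rw [h]; rfl)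
    unfold pvPreCheck at hpre
    rw [h] at hpre
    simp only [Bool.and_eq_true, decide_eq_true_eq] at hpre
    obtain ⟨hlen1, hpre2⟩ := hpre
    have hget1 : PySem.List.pyGet? W ((k : Int) + 1) = some (W.getD (k+1) []) := by
      have hc : ((k : Int) + 1) = ((k + 1 : Nat) : Int) := by push_cast; ring
      rw [hc, PySem.List.pyGet?_natCast, List.getElem?_eq_getElem hlen1,
        List.getD_eq_getElem _ _ hlen1]
    by_cases hsp : W.getD (k+1) [] = "a".toList ∨ W.getD (k+1) [] = "an".toList ∨
        W.getD (k+1) [] = "the".toList ∨ W.getD (k+1) [] = "not".toList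
    · have hlen2 : k + 2 < W.length := by
        rw [if_pos hsp] at hpre2
        exact of_decide_eq_true hpre2
      have hget2 : PySem.List.pyGet? W ((k : Int) + 2) = some (W.getD (k+2) []) := by
        have hc : ((k : Int) + 2) = ((k + 2 : Nat) : Int) := by push_cast; ring
        rw [hc, PySem.List.pyGet?_natCast, List.getElem?_eq_getElem hlen2,
          List.getD_eq_getElem _ _ hlen2]
      refine Eq.trans
        (pvFoldP W
          (if W.getD (k+1) [] = "a".toList ∨ W.getD (k+1) [] = "an".toList ∨ W.getD (k+1) [] = "the".toList then
            some ("Hi ".toList ++ W.getD (k+2) [] ++ ", I'm dad.".toList)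
          else if W.getD (k+1) [] = "not".toList then
            some ("Hi not ".toList ++ W.getD (k+2) [] ++ ", I'm dad.".toList)
          else some ("Hi ".toList ++ W.getD (k+1) [] ++ ", I'm dad.".toList)) ?_ none) ?_
      · intro o x hx
        by_cases hxim : x = "im".toList
        · subst hxim
          rw [if_pos (Or.inr rfl), if_pos rfl, h]
          simp only [hget1, hget2]
        · have h1 := hW x hx
          simp at h1 hxim
          simp [h1, hxim]
      · rw [if_pos hmem]
        unfold pvIdxExpr
        rw [h]
        show _ = pvIdxAt W k
        unfold pvIdxAt
        simp only [hget1, hget2]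
    · simp only [not_or] at hsp
      obtain ⟨h1, h2, h3, h4⟩ := hsp
      refine Eq.trans
        (pvFoldP W (some ("Hi ".toList ++ W.getD (k+1) [] ++ ", I'm dad.".toList)) ?_ none) ?_
      · intro o x hx
        by_cases hxim : x = "im".toList
        · subst hxim
          rw [if_pos (Or.inr rfl), if_pos rfl, h]
          simp only [hget1]
          rw [if_neg (by tauto), if_neg h4]
        · have h1 := hW x hx
          simp at h1 hxim
          simp [h1, hxim]
      · rw [if_pos hmem]
        unfold pvIdxExpr
        rw [h]
        show _ = pvIdxAt W k
        unfold pvIdxAt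
        simp only [hget1]
        rw [if_neg (by tauto), if_neg h4]

lemma pvIdxAt_cons (w : List Char) (ws : List (List Char)) (k : Nat) :
    pvIdxAt (w :: ws) (k + 1) = pvIdxAt ws k := by
  unfold pvIdxAt
  have e1 : ((k + 1 : Nat) : Int) + 1 = ((k + 2 : Nat) : Int) := by push_cast; ring
  have e2 : ((k + 1 : Nat) : Int) + 2 = ((k + 3 : Nat) : Int) := by push_cast; ring
  have f1 : ((k : Nat) : Int) + 1 = ((k + 1 : Nat) : Int) := by push_cast; ring
  have f2 : ((k : Nat) : Int) + 2 = ((k + 2 : Nat) : Int) := by push_cast; ring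
  rw [e1, e2, f1, f2, PySem.List.pyGet?_natCast, PySem.List.pyGet?_natCast,
    PySem.List.pyGet?_natCast, PySem.List.pyGet?_natCast]
  simp only [List.getElem?_cons_succ]

-- B's streaming walk equals the same index characterisation (unconditionally)
lemma pvWalkEq : ∀ W : List (List Char), dadWalk W = pvIdxExpr W := by
  intro W
  induction W with
  | nil => rfl
  | cons w ws ih =>
    by_cases hw : w = "im".toList
    · subst hw
      unfold pvIdxExpr
      rw [PySem.List.index?_cons_self]
      show dadWalk _ = pvIdxAt ("im".toList :: ws) 0
      unfold pvIdxAt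
      have e1 : ((0 : Nat) : Int) + 1 = ((1 : Nat) : Int) := by norm_num
      have e2 : ((0 : Nat) : Int) + 2 = ((2 : Nat) : Int) := by norm_num
      rw [e1, e2, PySem.List.pyGet?_natCast, PySem.List.pyGet?_natCast]
      unfold dadWalk
      rw [if_pos rfl]
      cases ws with
      | nil => rfl
      | cons nxt rest =>
        simp only [List.getElem?_cons_succ, List.getElem?_cons_zero]
        cases rest <;> split_ifs <;> simp_all
    · unfold dadWalk
      rw [if_neg hw, ih]
      unfold pvIdxExpr
      rw [PySem.List.index?_cons_of_ne _ hw]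
      cases hk : PySem.List.index? ws "im".toList with
      | none => rfl
      | some k =>
        show pvIdxAt ws k = _
        simp only [Option.map_some]
        show _ = pvIdxAt (w :: ws) (k + 1)
        rw [pvIdxAt_cons]

-- the cleaned word lists of the two ports coincide
lemma pvWordsA (msg : String) :
    PySem.Chars.split₀ (PySem.Chars.lower (PySem.Chars.lower
      (msg.toList.foldl (fun acc c => if c ∈ dadPunct then acc else acc ++ [c]) [])))
    = pvWords msg := by
  have h1 : (fun (acc : List Char) c => if c ∈ dadPunct then acc else acc ++ [c])
      = (fun (acc : List Char) c => if (decide (¬ c ∈ dadPunct)) = true then acc ++ [id c] else acc) := by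
    funext acc c; by_cases hx : c ∈ dadPunct <;> simp [hx]
  have hf : msg.toList.foldl (fun acc c => if c ∈ dadPunct then acc else acc ++ [c]) []
      = msg.toList.filter (fun c => ¬ c ∈ dadPunct) := by
    rw [h1, PySem.List.foldl_append_if]
    simp
  rw [hf, pvLowerIdem]
  rfl

-- ===== VERDICT (by name: the statement is the Claim_ definition above) =====
theorem dad_spec : Claim_equal_dad := by
  intro msg _dom hpre
  unfold Spec_dad dad dad_alt
  simp only []
  rw [pvWordsA msg]
  show (Option.map String.ofList _) = (Option.map String.ofList _)
  rw [pvCore (pvWords msg) (pvNoIm' msg) hpre, pvWalkEq]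
  unfold pvWords
  rfl
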